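-- pv_equiv track=rewrite | github.com/juniorbnkr/bookbot-mvp | src/messages.py | break_msgs_by_limit
-- ===== SOURCE A (Python) =====
-- def break_msgs_by_limit (msgs):
--     result = []
--     for string in msgs:
--         while len(string) > 4096:
--             limit = 4096
--             ponto = string.rfind('.', 0, limit)
--
--             if ponto != -1:
--                 result.append(string[:ponto+1])  # Inclui o ponto na divisão
--                 string = string[ponto+1:]  # Remove a parte dividida
--             else:
--                 # Se não encontrar ponto, divide em 4096 caracteres
--                 result.append(string[:limit])
--                 string = string[limit:]
--
--         result.append(string)  # Adiciona a última parte da string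
--     return result
-- ===== SOURCE B (Python) =====
-- def break_msgs_by_limit(msgs):
--     # Different algorithm: split each message into '.'-terminated segments once,
--     # then greedily pack whole segments into <=4096-char chunks; a segment that
--     # alone exceeds the limit gets hard 4096-char cuts.
--     result = []
--     for s in msgs:
--         parts = s.split('.')
--         last = parts.pop()
--         segs = [p + '.' for p in parts]
--         segs.append(last)
--         chunk = []
--         clen = 0
--         for seg in segs:
--             while clen + len(seg) > 4096:
--                 if clen:
--                     result.append(''.join(chunk))
--                     chunk = []
--                     clen = 0
--                 else:
--                     result.append(seg[:4096])
--                     seg = seg[4096:]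
--             chunk.append(seg)
--             clen += len(seg)
--         result.append(''.join(chunk))
--     return result
-- ===== Notes on version B (the rewrite author's own statement) =====
-- stated objective: alternative
-- what changed: B splits each message once on '.' and greedily packs whole '.'-terminated segments into <=4096-char chunks (hard 4096-cuts only inside an oversized segment), instead of A's repeated rfind on the first 4096 chars of an ever-reassigned remaining tail.
import Mathlib
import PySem

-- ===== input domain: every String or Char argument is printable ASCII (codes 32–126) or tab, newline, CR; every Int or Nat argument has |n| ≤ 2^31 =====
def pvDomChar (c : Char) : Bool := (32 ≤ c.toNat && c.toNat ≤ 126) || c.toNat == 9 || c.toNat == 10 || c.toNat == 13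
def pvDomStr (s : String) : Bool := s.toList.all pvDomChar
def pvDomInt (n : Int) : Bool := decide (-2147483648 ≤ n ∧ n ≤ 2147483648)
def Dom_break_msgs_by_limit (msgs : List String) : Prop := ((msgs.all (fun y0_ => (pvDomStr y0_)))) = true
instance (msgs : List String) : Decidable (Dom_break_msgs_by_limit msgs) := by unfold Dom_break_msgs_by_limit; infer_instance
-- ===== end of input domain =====

-- B replaces A's repeated rfind-on-the-remaining-tail loop by ONE split('.') per
-- message followed by greedy packing of whole segments into ≤4096-char chunks
-- (objective: alternative algorithm).

-- ===== PORT A =====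

-- Used only by the port's termination proof (cited in decreasing_by):
-- rfind.go never returns anything below -1.
theorem pv_rfind_go_ge (s sub : List Char) (j : Nat) : -1 ≤ PySem.Chars.rfind.go s sub j := by
  induction j with
  | zero => unfold PySem.Chars.rfind.go; split_ifs <;> omega
  | succ j ih => unfold PySem.Chars.rfind.go; split_ifs <;> omega

-- Used by the port's termination proof: a found ponto is ≥ 0.
theorem pv_rfindA_nonneg (t : List Char) (h : 4096 < t.length)
    (hp : PySem.Chars.rfindFrom t ['.'] 0 (some 4096) ≠ -1) :
    0 ≤ PySem.Chars.rfindFrom t ['.'] 0 (some 4096) := by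
  unfold PySem.Chars.rfindFrom at *
  have h1 : ¬ ((t.length : Int) < 4096) := by exact_mod_cast Nat.not_lt.mpr h.le
  simp only [h1, if_false] at *
  norm_num at *
  have := pv_rfind_go_ge (List.take (4096 : Int).toNat t) ['.']
    (List.take (4096 : Int).toNat t).length
  unfold PySem.Chars.rfind at *
  split_ifs at * <;> omega

-- Used by the port's termination proof: both tail slices strictly shorten the string.
theorem pv_sliceA_len_lt (t : List Char) (p : Int) (h0 : 0 ≤ p) (ht : 0 < t.length) :
    (PySem.List.slice t (some (p + 1)) none).length < t.length := by
  have : p + 1 = (((p + 1).toNat : Nat) : Int) := by omega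
  rw [this, PySem.List.slice_from_natCast, List.length_drop]
  omega

-- A's inner `while len(string) > 4096` loop; `string` is the code-point list of the
-- current message, `result` the accumulator of the outer for-loop.
-- `PySem.Chars.rfindFrom string ['.'] 0 (some 4096)` is Python's
-- `ponto = string.rfind('.', 0, limit)` with `limit = 4096`.
def pvABreak (string : List Char) (result : List String) : List String :=
  if h : 4096 < string.length then
    if hp : PySem.Chars.rfindFrom string ['.'] 0 (some 4096) ≠ -1 then
      pvABreak (PySem.List.slice string (some (PySem.Chars.rfindFrom string ['.'] 0 (some 4096) + 1)) none)
        (result ++ [String.ofList (PySem.List.slice string none (some (PySem.Chars.rfindFrom string ['.'] 0 (some 4096) + 1)))])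
    else
      pvABreak (PySem.List.slice string (some 4096) none)
        (result ++ [String.ofList (PySem.List.slice string none (some 4096))])
  else result ++ [String.ofList string]
termination_by string.length
decreasing_by
  · exact pv_sliceA_len_lt _ _ (pv_rfindA_nonneg _ h hp) (by omega)
  · rw [show (4096 : Int) = ((4096 : Nat) : Int) from rfl, PySem.List.slice_from_natCast,
      List.length_drop]
    omega

def break_msgs_by_limit (msgs : List String) : List String :=
  msgs.foldl (fun result string => pvABreak string.toList result) []

-- ===== PORT B =====

-- B's inner `while clen + len(seg) > 4096` loop: flush the collected chunk, or
-- hard-cut 4096 chars off a segment that alone exceeds the limit.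
-- `seg[:4096]` / `seg[4096:]` are `take` / `drop` (nonnegative literal bounds);
-- `''.join(chunk)` is `chunk.flatten`.
def pvBWhile (seg : List Char) (chunk : List (List Char)) (clen : Nat) (result : List String) :
    List (List Char) × Nat × List String :=
  if h4 : 4096 < clen + seg.length then
    if hc : clen ≠ 0 then
      pvBWhile seg [] 0 (result ++ [String.ofList chunk.flatten])
    else
      pvBWhile (seg.drop 4096) chunk clen (result ++ [String.ofList (seg.take 4096)])
  else (chunk ++ [seg], clen + seg.length, result)
termination_by clen + seg.length
decreasing_by
  · omega
  · simp only [List.length_drop]; omega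

-- one message: parts = s.split('.'); last = parts.pop(); segs = [p+'.' for p in parts]+[last]
-- (split never returns an empty list, so parts[-1] is `parts.getLastD []`);
-- then the for-loop over segs with state (chunk, clen, result), and the final append.
def pvBMsg (result : List String) (s : String) : List String :=
  let parts := PySem.Chars.splitOn s.toList ['.']
  let last := parts.getLastD []
  let segs := parts.dropLast.map (fun p => p ++ ['.']) ++ [last]
  let st := segs.foldl (fun (st : List (List Char) × Nat × List String) seg =>
      pvBWhile seg st.1 st.2.1 st.2.2) ([], 0, result)
  st.2.2 ++ [String.ofList st.1.flatten]

def break_msgs_by_limit_alt (msgs : List String) : List String :=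
  msgs.foldl pvBMsg []

-- ===== PRECONDITION & SPEC =====
def Spec_break_msgs_by_limit (msgs : List String) (out : List String) : Prop := out = break_msgs_by_limit_alt msgs
instance (msgs : List String) (out : List String) : Decidable (Spec_break_msgs_by_limit msgs out) := by unfold Spec_break_msgs_by_limit; infer_instance

-- ===== CLAIM (what is proved, stated in full; the proofs are below) =====
def Claim_equal_break_msgs_by_limit : Prop := ∀ (msgs : List String), Dom_break_msgs_by_limit msgs → Spec_break_msgs_by_limit msgs (break_msgs_by_limit msgs)

-- ===== LEMMAS AND PROOFS =====

-- `['.'].isPrefixOf l` tests the head.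
theorem pv_prefix_dot (l : List Char) : ['.'].isPrefixOf l = true ↔ l.head? = some '.' := by
  cases l with
  | nil => simp [List.isPrefixOf]
  | cons c r =>
    simp only [List.isPrefixOf, Bool.and_eq_true, beq_iff_eq, List.head?, Option.some.injEq]
    constructor
    · rintro ⟨h, -⟩; exact h.symm
    · intro h; exact ⟨h.symm, by simp⟩

-- rfind.go returns -1 when no dot occurs at an index ≤ j.
theorem pv_go_none (s : List Char) (j : Nat) (h : ∀ i, i ≤ j → s[i]? ≠ some '.') :
    PySem.Chars.rfind.go s ['.'] j = -1 := by
  induction j with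
  | zero =>
    unfold PySem.Chars.rfind.go
    rw [if_neg]
    intro hpre
    exact h 0 le_rfl (by rw [← List.head?_eq_getElem?]; exact (pv_prefix_dot s).mp hpre)
  | succ j ih =>
    unfold PySem.Chars.rfind.go
    rw [if_neg, ih (fun i hi => h i (Nat.le_succ_of_le hi))]
    intro hpre
    have := (pv_prefix_dot _).mp hpre
    rw [List.head?_drop] at this
    exact h (j + 1) le_rfl this

-- rfind.go returns the highest dot index ≤ j.
theorem pv_go_eq (s : List Char) (j k : Nat) (hk : s[k]? = some '.') (hkj : k ≤ j)
    (h : ∀ i, k < i → i ≤ j → s[i]? ≠ some '.') :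
    PySem.Chars.rfind.go s ['.'] j = (k : Int) := by
  induction j with
  | zero =>
    interval_cases k
    unfold PySem.Chars.rfind.go
    rw [if_pos ((pv_prefix_dot s).mpr (by rw [List.head?_eq_getElem?]; exact hk))]
    simp
  | succ j ih =>
    unfold PySem.Chars.rfind.go
    by_cases hkj' : k = j + 1
    · subst hkj'
      rw [if_pos ((pv_prefix_dot _).mpr (by rw [List.head?_drop]; exact hk))]
    · have hkj'' : k ≤ j := by omega
      rw [if_neg, ih hkj'' (fun i hi hij => h i hi (Nat.le_succ_of_le hij))]
      intro hpre
      have := (pv_prefix_dot _).mp hpre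
      rw [List.head?_drop] at this
      exact h (j + 1) (by omega) le_rfl this

-- rfind on a dotless list is -1.
theorem pv_rfind_no_dot (s : List Char) (h : '.' ∉ s) :
    PySem.Chars.rfind s ['.'] = -1 := by
  unfold PySem.Chars.rfind
  exact pv_go_none s s.length (fun i _ hi => h (by
    exact List.mem_of_getElem? hi))

-- rfind on x ++ y with x ending in '.' and y dotless hits x's last position.
theorem pv_rfind_last_dot (x y : List Char) (hx : x ≠ []) (hxl : x.getLast? = some '.')
    (hy : '.' ∉ y) : PySem.Chars.rfind (x ++ y) ['.'] = (x.length : Int) - 1 := by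
  have hlen : 0 < x.length := List.length_pos_iff.mpr hx
  have hk : (x ++ y)[x.length - 1]? = some '.' := by
    rw [List.getElem?_append_left (by omega)]
    rw [List.getLast?_eq_getElem?] at hxl
    exact hxl
  unfold PySem.Chars.rfind
  have := pv_go_eq (x ++ y) (x ++ y).length (x.length - 1) hk (by simp; omega) ?_
  · rw [this]; omega
  · intro i hi _ hdot
    have hix : x.length ≤ i := by omega
    rw [List.getElem?_append_right hix] at hdot
    exact hy (List.mem_of_getElem? hdot)

-- A's rfind call normalized: string.rfind('.', 0, 4096) with 4096 < len is rfind
-- on the first 4096 characters.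
theorem pv_rfindFrom_A (t : List Char) (h : 4096 < t.length) :
    PySem.Chars.rfindFrom t ['.'] 0 (some 4096) =
      PySem.Chars.rfind (t.take 4096) ['.'] := by
  unfold PySem.Chars.rfindFrom
  have h1 : ¬ ((t.length : Int) < 4096) := by exact_mod_cast Nat.not_lt.mpr h.le
  simp only [h1, if_false]
  norm_num
  rw [show ((4096 : Int)).toNat = 4096 from rfl]
  split_ifs with hx <;> omega

-- A-step: below the limit the loop ends and emits the remainder.
theorem pvA_term (t : List Char) (h : ¬ 4096 < t.length) (r : List String) :
    pvABreak t r = r ++ [String.ofList t] := by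
  rw [pvABreak]; simp [h]

-- A-step, soft cut: remainder x ++ y with x ending in '.', |x| ≤ 4096 and no further
-- dot inside the window emits x and continues with y.
theorem pvA_soft (x y : List Char) (hx : x ≠ []) (hxl : x.getLast? = some '.')
    (hlen : x.length ≤ 4096) (hy : '.' ∉ y.take (4096 - x.length))
    (hbig : 4096 < x.length + y.length) (r : List String) :
    pvABreak (x ++ y) r = pvABreak y (r ++ [String.ofList x]) := by
  have hlenxy : 4096 < (x ++ y).length := by simp; omega
  have hwin : (x ++ y).take 4096 = x ++ y.take (4096 - x.length) := by
    rw [List.take_append, List.take_of_length_le (by omega)]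
  have hrf : PySem.Chars.rfindFrom (x ++ y) ['.'] 0 (some 4096) = (x.length : Int) - 1 := by
    rw [pv_rfindFrom_A _ hlenxy, hwin, pv_rfind_last_dot x _ hx hxl hy]
  rw [pvABreak]
  have hlp : 0 < x.length := List.length_pos_iff.mpr hx
  rw [dif_pos hlenxy, dif_pos (by rw [hrf]; omega), hrf]
  have hcast : (x.length : Int) - 1 + 1 = ((x.length : Nat) : Int) := by omega
  rw [hcast, PySem.List.slice_from_natCast, PySem.List.slice_to_natCast,
    List.drop_append_of_le_length le_rfl, List.take_append_of_le_length le_rfl]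
  simp

-- A-step, hard cut: no dot in the first 4096 characters.
theorem pvA_hard (t : List Char) (hbig : 4096 < t.length) (hnd : '.' ∉ t.take 4096)
    (r : List String) :
    pvABreak t r = pvABreak (t.drop 4096) (r ++ [String.ofList (t.take 4096)]) := by
  have hrf : PySem.Chars.rfindFrom t ['.'] 0 (some 4096) = -1 := by
    rw [pv_rfindFrom_A _ hbig]; exact pv_rfind_no_dot _ hnd
  rw [pvABreak, dif_pos hbig, dif_neg (by rw [hrf]; simp)]
  rw [show (4096 : Int) = ((4096 : Nat) : Int) from rfl, PySem.List.slice_from_natCast,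
    PySem.List.slice_to_natCast]

-- a prefix shorter than the last position avoids the last character.
theorem pv_take_dropLast (seg : List Char) (m : Nat) (hm : m ≤ seg.length - 1)
    (h4 : '.' ∉ seg.dropLast) : '.' ∉ seg.take m := by
  intro hmem
  apply h4
  rw [List.dropLast_eq_take]
  have : seg.take m = (seg.take (seg.length - 1)).take m := by
    rw [List.take_take, min_eq_left hm]
  rw [this] at hmem
  exact List.mem_of_mem_take hmem

theorem pv_getLast?_drop (l : List Char) (n : Nat) (h : n < l.length) :
    (l.drop n).getLast? = l.getLast? := by
  rw [List.getLast?_eq_getElem?, List.getLast?_eq_getElem?, List.getElem?_drop, List.length_drop]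
  congr 1
  omega

-- B's while loop: it keeps the invariants (clen = |chunk|, clen ≤ 4096, the joined
-- chunk ends exactly where chunk ++ seg ends) and performs exactly A's cuts.
theorem pvB_while (seg : List Char) (chunk : List (List Char)) (clen : Nat)
    (result : List String)
    (h1 : clen = chunk.flatten.length) (h2 : clen ≤ 4096)
    (h3 : clen = 0 ∨ chunk.flatten.getLast? = some '.')
    (h4 : '.' ∉ seg.dropLast) :
    (pvBWhile seg chunk clen result).2.1 = (pvBWhile seg chunk clen result).1.flatten.length ∧
    (pvBWhile seg chunk clen result).2.1 ≤ 4096 ∧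
    (pvBWhile seg chunk clen result).1.flatten.getLast? = (chunk.flatten ++ seg).getLast? ∧
    ∀ u, pvABreak (chunk.flatten ++ (seg ++ u)) result =
      pvABreak ((pvBWhile seg chunk clen result).1.flatten ++ u)
        (pvBWhile seg chunk clen result).2.2 := by
  induction seg, chunk, clen, result using pvBWhile.induct with
  | case1 seg chunk clen result hbig hc ih =>
    rw [pvBWhile, dif_pos hbig, dif_pos hc]
    have hC : chunk.flatten ≠ [] := by
      intro he; rw [he] at h1; simp at h1; omega
    have hxl : chunk.flatten.getLast? = some '.' := h3.resolve_left hc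
    have hseg : 1 ≤ seg.length := by omega
    obtain ⟨g1, g2, g3, g4⟩ := ih rfl (by omega) (Or.inl rfl) h4
    refine ⟨g1, g2, ?_, ?_⟩
    · rw [g3]
      simp only [List.flatten_nil, List.nil_append]
      exact (List.getLast?_append_of_ne_nil _ (by
        intro he; rw [he] at hseg; simp at hseg)).symm
    · intro u
      have hy : '.' ∉ (seg ++ u).take (4096 - chunk.flatten.length) := by
        rw [List.take_append_of_le_length (by omega)]
        exact pv_take_dropLast seg _ (by omega) h4
      rw [pvA_soft chunk.flatten (seg ++ u) hC hxl (by omega) hy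
        (by simp only [List.length_append]; omega)]
      have := g4 u
      simpa using this
  | case2 seg chunk clen result hbig hc ih =>
    rw [pvBWhile, dif_pos hbig, dif_neg hc]
    have hc0 : clen = 0 := by omega
    have hCnil : chunk.flatten = [] := by
      rw [hc0] at h1; exact List.length_eq_zero_iff.mp h1.symm
    have hseg : 4096 < seg.length := by omega
    have h4' : '.' ∉ (seg.drop 4096).dropLast := by
      intro hm
      apply h4
      rw [List.dropLast_eq_take, List.length_drop,
        show seg.length - 4096 - 1 = seg.length - 1 - 4096 from by omega,
        ← List.drop_take] at hm
      rw [List.dropLast_eq_take]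
      exact List.mem_of_mem_drop hm
    obtain ⟨g1, g2, g3, g4⟩ := ih h1 h2 (Or.inl hc0) h4'
    refine ⟨g1, g2, ?_, ?_⟩
    · rw [g3, hCnil]
      simp only [List.nil_append]
      exact pv_getLast?_drop seg 4096 hseg
    · intro u
      rw [hCnil]
      simp only [List.nil_append]
      rw [pvA_hard (seg ++ u) (by simp; omega)
        (by rw [List.take_append_of_le_length (by omega)]
            exact pv_take_dropLast seg 4096 (by omega) h4)]
      rw [List.take_append_of_le_length (by omega), List.drop_append_of_le_length (by omega)]
      have := g4 u
      rw [hCnil] at this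
      simpa using this
  | case3 seg chunk clen result hbig =>
    rw [pvBWhile, dif_neg hbig]
    refine ⟨by simp [h1], by show clen + seg.length ≤ 4096; omega, by simp, ?_⟩
    intro u
    simp [List.append_assoc]

-- the '.'-joined remainder named by a parts list.
def pvJ (parts : List (List Char)) : List Char :=
  ((parts.dropLast.map (fun p => p ++ ['.'])) ++ [parts.getLastD []]).flatten

theorem pvJ_singleton (p : List Char) : pvJ [p] = p := by simp [pvJ]

theorem pvJ_cons (p : List Char) (rest : List (List Char)) (h : rest ≠ []) :
    pvJ (p :: rest) = (p ++ ['.']) ++ pvJ rest := by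
  cases rest with
  | nil => exact absurd rfl h
  | cons a l => simp [pvJ]

-- B's fold over the segments of `parts` equals A's loop on the joined remainder.
theorem pv_fold (parts : List (List Char)) (chunk : List (List Char)) (clen : Nat)
    (result : List String)
    (h1 : clen = chunk.flatten.length) (h2 : clen ≤ 4096)
    (h3 : clen = 0 ∨ chunk.flatten.getLast? = some '.')
    (hw : ∀ p ∈ parts, '.' ∉ p) (hne : parts ≠ []) :
    (((parts.dropLast.map (fun p => p ++ ['.'])) ++ [parts.getLastD []]).foldl
        (fun (st : List (List Char) × Nat × List String) seg =>
          pvBWhile seg st.1 st.2.1 st.2.2) (chunk, clen, result)).2.2 ++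
      [String.ofList (((parts.dropLast.map (fun p => p ++ ['.'])) ++ [parts.getLastD []]).foldl
        (fun (st : List (List Char) × Nat × List String) seg =>
          pvBWhile seg st.1 st.2.1 st.2.2) (chunk, clen, result)).1.flatten] =
    pvABreak (chunk.flatten ++ pvJ parts) result := by
  induction parts generalizing chunk clen result with
  | nil => exact absurd rfl hne
  | cons p rest ih =>
    cases rest with
    | nil =>
      rw [show [p].dropLast.map (fun q => q ++ ['.']) ++ [[p].getLastD []] = [p] from rfl,
        pvJ_singleton, List.foldl_cons, List.foldl_nil]
      obtain ⟨g1, g2, g3, g4⟩ := pvB_while p chunk clen result h1 h2 h3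
        (fun hm => hw p (List.mem_singleton_self p) (List.mem_of_mem_dropLast hm))
      have hterm := g4 []
      simp only [List.append_nil] at hterm
      rw [hterm, pvA_term _ (by omega)]
    | cons a l =>
      have hsegs : (p :: a :: l).dropLast.map (fun q => q ++ ['.']) ++
          [(p :: a :: l).getLastD []] =
          ((p ++ ['.']) :: ((a :: l).dropLast.map (fun q => q ++ ['.']) ++
            [(a :: l).getLastD []])) := by
        simp
      rw [hsegs, List.foldl_cons]
      have h4p : '.' ∉ (p ++ ['.']).dropLast := by
        rw [List.dropLast_concat]
        exact hw p (List.mem_cons_self)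
      obtain ⟨g1, g2, g3, g4⟩ := pvB_while (p ++ ['.']) chunk clen result h1 h2 h3 h4p
      have hdot : (pvBWhile (p ++ ['.']) chunk clen result).1.flatten.getLast? = some '.' := by
        rw [g3, ← List.append_assoc, List.getLast?_concat]
      have hih := ih (pvBWhile (p ++ ['.']) chunk clen result).1
        (pvBWhile (p ++ ['.']) chunk clen result).2.1
        (pvBWhile (p ++ ['.']) chunk clen result).2.2
        g1 g2 (Or.inr hdot)
        (fun q hq => hw q (List.mem_cons_of_mem p hq)) (by simp)
      rw [hih, pvJ_cons p (a :: l) (by simp)]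
      exact (g4 (pvJ (a :: l))).symm

-- the split recursion, accumulator-free.
def pvSpl (pre : List Char) : List Char → List (List Char)
  | [] => [pre]
  | c :: rest => if c = '.' then pre :: pvSpl [] rest else pvSpl (pre ++ [c]) rest

theorem pv_splitOn_go (fuel : Nat) : ∀ (l cur : List Char) (acc : List (List Char)),
    l.length ≤ fuel →
    PySem.Chars.splitOn.go ['.'] fuel l cur acc = acc.reverse ++ pvSpl cur.reverse l := by
  induction fuel with
  | zero =>
    intro l cur acc hl
    have : l = [] := List.length_eq_zero_iff.mp (by omega)
    subst this
    unfold PySem.Chars.splitOn.go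
    simp [pvSpl]
  | succ fuel ih =>
    intro l cur acc hl
    cases l with
    | nil =>
      unfold PySem.Chars.splitOn.go
      simp [pvSpl]
    | cons c rest =>
      unfold PySem.Chars.splitOn.go
      by_cases hc : c = '.'
      · rw [if_pos ((pv_prefix_dot _).mpr (by simp [hc]))]
        simp only [List.length_cons] at hl
        rw [show List.drop ['.'].length (c :: rest) = rest by simp]
        rw [ih rest [] (cur.reverse :: acc) (by omega)]
        simp [pvSpl, hc]
      · rw [if_neg (by rw [pv_prefix_dot]; simp only [List.head?, Option.some.injEq]; exact hc)]
        simp only [List.length_cons] at hl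
        rw [ih rest (c :: cur) acc (by omega)]
        simp [pvSpl, hc]

theorem pv_splitOn_eq (s : List Char) : PySem.Chars.splitOn s ['.'] = pvSpl [] s := by
  unfold PySem.Chars.splitOn
  rw [pv_splitOn_go (s.length + 1) s [] [] (by omega)]
  simp

theorem pv_spl_ne_nil (l pre : List Char) : pvSpl pre l ≠ [] := by
  induction l generalizing pre with
  | nil => simp [pvSpl]
  | cons c rest ih => simp only [pvSpl]; split_ifs <;> simp [ih]

theorem pv_spl_no_dot (l : List Char) : ∀ (pre : List Char), '.' ∉ pre →
    ∀ p ∈ pvSpl pre l, '.' ∉ p := by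
  induction l with
  | nil =>
    intro pre hpre p hp
    simp only [pvSpl, List.mem_singleton] at hp
    subst hp; exact hpre
  | cons c rest ih =>
    intro pre hpre p hp
    by_cases hc : c = '.'
    · rw [pvSpl, if_pos hc] at hp
      rcases List.mem_cons.mp hp with hp | hp
      · subst hp; exact hpre
      · exact ih [] (by simp) p hp
    · rw [pvSpl, if_neg hc] at hp
      refine ih (pre ++ [c]) ?_ p hp
      simp only [List.mem_append, List.mem_singleton]
      rintro (h | h)
      · exact hpre h
      · exact hc h.symm

theorem pv_J_spl (l : List Char) : ∀ (pre : List Char), pvJ (pvSpl pre l) = pre ++ l := by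
  induction l with
  | nil => intro pre; simp [pvSpl, pvJ_singleton]
  | cons c rest ih =>
    intro pre
    simp only [pvSpl]
    split_ifs with hc
    · rw [pvJ_cons _ _ (pv_spl_ne_nil rest []), ih []]
      simp [hc]
    · rw [ih (pre ++ [c])]
      simp

-- one message: B's pvBMsg equals A's loop on the message.
theorem pv_msg (result : List String) (s : String) :
    pvBMsg result s = pvABreak s.toList result := by
  unfold pvBMsg
  rw [pv_splitOn_eq]
  have := pv_fold (pvSpl [] s.toList) [] 0 result (by simp) (by omega) (Or.inl rfl)
    (pv_spl_no_dot s.toList [] (by simp)) (pv_spl_ne_nil s.toList [])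
  simpa [pv_J_spl s.toList []] using this

-- ===== VERDICT (by name: the statement is the Claim_ definition above) =====
theorem break_msgs_by_limit_spec : Claim_equal_break_msgs_by_limit := by
  intro msgs _
  unfold Spec_break_msgs_by_limit break_msgs_by_limit break_msgs_by_limit_alt
  congr 1
  funext result string
  exact (pv_msg result string).symm
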